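-- pv_equiv track=rewrite | github.com/tlian25/advent-of-code-2020 | day21_allergen_assessment.py | build_sets
-- ===== SOURCE A (Python) =====
-- def build_sets(foods) -> (set, dict):
--     # For each allergen, list possible ingredients containing it
--     possible = {}
--     all_ings = set()
--     for ing, algs in foods:
--         all_ings = all_ings.union(ing)
--         for a in algs:
--             if a in possible:
--                 possible[a] = possible[a].intersection(ing)
--             else:
--                 possible[a] = ing
--
--     return all_ings, possible
-- ===== SOURCE B (Python) =====
-- def build_sets(foods) -> (set, dict):
--     # Index-first decomposition: union all ingredient sets; group the ingredient
--     # sets per allergen; then reduce each group with set intersection.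
--     all_ings = set().union(*(ing for ing, _ in foods))
--     index = {}
--     for ing, algs in foods:
--         for a in algs:
--             index.setdefault(a, []).append(ing)
--     possible = {a: sets[0].intersection(*sets[1:]) for a, sets in index.items()}
--     return all_ings, possible
-- ===== Notes on version B (the rewrite author's own statement) =====
-- stated objective: alternative
-- what changed: Replaces A's single interleaved loop with its membership test and running per-allergen intersection by an index-first decomposition: one union of all ingredient sets, one grouping pass collecting each allergen's ingredient sets, then a per-allergen reduce with set intersection.
import Mathlib
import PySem

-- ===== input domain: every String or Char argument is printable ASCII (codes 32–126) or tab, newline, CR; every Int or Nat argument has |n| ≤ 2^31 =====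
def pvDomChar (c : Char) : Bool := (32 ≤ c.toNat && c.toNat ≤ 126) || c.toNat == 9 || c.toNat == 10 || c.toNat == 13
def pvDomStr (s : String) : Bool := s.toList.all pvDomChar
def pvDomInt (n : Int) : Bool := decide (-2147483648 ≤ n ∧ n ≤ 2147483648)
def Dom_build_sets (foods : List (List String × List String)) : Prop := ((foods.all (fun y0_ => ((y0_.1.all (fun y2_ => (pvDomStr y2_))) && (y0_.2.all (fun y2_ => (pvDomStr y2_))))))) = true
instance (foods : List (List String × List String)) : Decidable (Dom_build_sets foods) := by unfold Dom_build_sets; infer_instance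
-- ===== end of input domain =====

-- B replaces A's single interleaved loop with its running per-allergen intersection by an
-- index-first decomposition: union all ingredient sets, group the ingredient sets per
-- allergen, then reduce each group with set intersection; objective: alternative shape,
-- same cost.

-- ===== PORT A =====
def build_sets (foods : List (List String × List String)) : List String × (List (String × List String)) :=
  let r := foods.foldl
    (fun st food =>
      (PySem.Set.union st.1 food.1,                                   -- all_ings = all_ings.union(ing)
       food.2.foldl (fun p a =>
         if p.contains a then
           p.insert a (PySem.Set.inter (p.getD a []) food.1)          -- possible[a] = possible[a].intersection(ing)
         else
           p.insert a food.1) st.2))                                  -- possible[a] = ing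
    (PySem.Set.empty, PySem.Dict.empty)
  (r.1, r.2.items)

-- ===== PORT B =====
def build_sets_alt (foods : List (List String × List String)) : List String × (List (String × List String)) :=
  let index := foods.foldl
    (fun d f => f.2.foldl (fun d a => d.modify a [] (· ++ [f.1])) d)  -- index.setdefault(a, []).append(ing)
    PySem.Dict.empty
  (PySem.Set.ofList (foods.flatMap Prod.fst),                         -- set().union(*(ing for ing, _ in foods))
   index.items.map (fun p => (p.1,                                    -- {a: sets[0].intersection(*sets[1:]) …}
     match p.2 with
     | [] => []                                                       -- unreachable: every indexed group is nonempty
     | s :: rest => rest.foldl PySem.Set.inter s)))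

-- ===== PRECONDITION & SPEC =====
def Spec_build_sets (foods : List (List String × List String)) (out : List String × (List (String × List String))) : Prop := out = build_sets_alt foods
instance (foods : List (List String × List String)) (out : List String × (List (String × List String))) : Decidable (Spec_build_sets foods out) := by unfold Spec_build_sets; infer_instance

-- ===== CLAIM (what is proved, stated in full; the proofs are below) =====
def Claim_equal_build_sets : Prop := ∀ (foods : List (List String × List String)), Dom_build_sets foods → Spec_build_sets foods (build_sets foods)

-- ===== LEMMAS AND PROOFS =====

-- A's pair-state fold splits into its two independent components.
theorem foldA_split (foods : List (List String × List String)) (s : PySem.Set String)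
    (d : PySem.Dict String (List String)) :
    foods.foldl
        (fun st food =>
          (PySem.Set.union st.1 food.1,
           food.2.foldl (fun p a =>
             if p.contains a then p.insert a (PySem.Set.inter (p.getD a []) food.1)
             else p.insert a food.1) st.2)) (s, d)
      = (PySem.Set.update s (foods.flatMap Prod.fst),
         foods.foldl (fun p food => food.2.foldl (fun p a =>
             if p.contains a then p.insert a (PySem.Set.inter (p.getD a []) food.1)
             else p.insert a food.1) p) d) := by
  induction foods generalizing s d with
  | nil => rfl
  | cons f rest ih =>
    simp only [List.foldl_cons, List.flatMap_cons, ih]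
    simp [PySem.Set.union, PySem.Set.update, List.foldl_append]

-- A's nested dict loop is the same loop over the flattened (allergen, ingredients) pairs.
theorem A_pairs (foods : List (List String × List String)) (d : PySem.Dict String (List String)) :
    foods.foldl (fun p food => food.2.foldl (fun p a =>
        if p.contains a then p.insert a (PySem.Set.inter (p.getD a []) food.1)
        else p.insert a food.1) p) d
      = (foods.flatMap (fun f => f.2.map (fun a => (a, f.1)))).foldl
          (fun p q => if p.contains q.1 then p.insert q.1 (PySem.Set.inter (p.getD q.1 []) q.2)
            else p.insert q.1 q.2) d := by
  induction foods generalizing d with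
  | nil => rfl
  | cons f rest ih =>
    simp only [List.foldl_cons, List.flatMap_cons, List.foldl_append, List.foldl_map, ih]

-- B's nested index loop is the same loop over the flattened pairs.
theorem B_pairs (foods : List (List String × List String)) (d : PySem.Dict String (List (List String))) :
    foods.foldl (fun d f => f.2.foldl (fun d a => d.modify a [] (· ++ [f.1])) d) d
      = (foods.flatMap (fun f => f.2.map (fun a => (a, f.1)))).foldl
          (fun d q => d.modify q.1 [] (· ++ [q.2])) d := by
  induction foods generalizing d with
  | nil => rfl
  | cons f rest ih =>
    simp only [List.foldl_cons, List.flatMap_cons, List.foldl_append, List.foldl_map, ih]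

-- A's two insert branches are one insert with a conditional value.
theorem stepA_insert_form :
    (fun (p : PySem.Dict String (List String)) (q : String × List String) =>
        if p.contains q.1 then p.insert q.1 (PySem.Set.inter (p.getD q.1 []) q.2)
        else p.insert q.1 q.2)
      = fun p q => p.insert q.1
          (if p.contains q.1 then PySem.Set.inter (p.getD q.1 []) q.2 else q.2) := by
  funext p q
  by_cases h : p.contains q.1 <;> simp [h]

-- The value A's loop leaves at key k is the left-nested intersection of the ingredient
-- sets collected for k (seeded with d's value when k is already a key).
theorem A_getD (l : List (String × List String)) (d : PySem.Dict String (List String)) (k : String) :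
    (l.foldl (fun p q => p.insert q.1
        (if p.contains q.1 then PySem.Set.inter (p.getD q.1 []) q.2 else q.2)) d).getD k []
      = if d.contains k then
          ((l.filter (fun q => q.1 == k)).map Prod.snd).foldl PySem.Set.inter (d.getD k [])
        else
          match (l.filter (fun q => q.1 == k)).map Prod.snd with
          | [] => d.getD k []
          | s :: rest => rest.foldl PySem.Set.inter s := by
  induction l generalizing d with
  | nil => by_cases h : d.contains k <;> simp [h]
  | cons q rest ih =>
    simp only [List.foldl_cons, List.filter_cons]
    by_cases hqk : q.1 = k
    · subst hqk
      rw [ih]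
      by_cases hc : d.contains q.1 <;>
        simp [hc, PySem.Dict.getD_insert_self]
    · have hbeq : (q.1 == k) = false := by simp [hqk]
      rw [ih]
      have hkq : k ≠ q.1 := fun h => hqk h.symm
      simp [hbeq, PySem.Dict.contains_insert, PySem.Dict.getD_insert, hkq]

-- With distinct keys a dict's items are its keys paired with their values.
theorem items_eq_map_keys {ν : Type} (d : PySem.Dict String ν) (v0 : ν) (h : d.keys.Nodup) :
    d.items = d.keys.map (fun k => (k, d.getD k v0)) := by
  simp only [PySem.Dict.keys, List.map_map]
  symm
  have hp : ∀ p ∈ d.items, ((fun k => (k, d.getD k v0)) ∘ Prod.fst) p = p := by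
    intro p hp
    have := PySem.Dict.getD_of_mem_items (d := d) (k := p.1) (v := p.2)
      (by exact hp) h v0
    simp [this]
  rw [List.map_congr_left hp]
  simp

-- Core: over the flattened pair list, A's running-intersection dict has the same items
-- as B's group-then-reduce construction.
theorem dict_items_eq (l : List (String × List String)) :
    (l.foldl (fun p q => if p.contains q.1 then p.insert q.1 (PySem.Set.inter (p.getD q.1 []) q.2)
        else p.insert q.1 q.2) PySem.Dict.empty).items
      = ((l.foldl (fun d q => d.modify q.1 [] (· ++ [q.2])) PySem.Dict.empty).items.map
          (fun p => (p.1,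
            match p.2 with
            | [] => []
            | s :: rest => rest.foldl PySem.Set.inter s))) := by
  rw [stepA_insert_form]
  have hkA := PySem.Dict.keys_foldl_insert_key (ν := List String) l Prod.fst
    (fun p q => if p.contains q.1 then PySem.Set.inter (p.getD q.1 []) q.2 else q.2)
    PySem.Dict.empty
  have hkB := PySem.Dict.keys_foldl_modify_key (ν := List (List String)) l Prod.fst []
    (fun _ q xs => xs ++ [q.2]) PySem.Dict.empty
  have hnA := PySem.Dict.nodup_keys_foldl_insert_key (ν := List String) l Prod.fst
    (fun p q => if p.contains q.1 then PySem.Set.inter (p.getD q.1 []) q.2 else q.2)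
    PySem.Dict.empty PySem.Dict.nodup_keys_empty
  have hnB := PySem.Dict.nodup_keys_foldl_modify_key (ν := List (List String)) l Prod.fst []
    (fun _ q xs => xs ++ [q.2]) PySem.Dict.empty PySem.Dict.nodup_keys_empty
  rw [items_eq_map_keys _ [] hnA, items_eq_map_keys _ [] hnB, List.map_map, hkA, hkB]
  apply List.map_congr_left
  intro k hk
  simp only [Function.comp]
  rw [A_getD, PySem.Dict.getD_foldl_modify_append]
  simp [PySem.Dict.contains_empty, PySem.Dict.getD_empty]
  rfl
-- ===== VERDICT (by name: the statement is the Claim_ definition above) =====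
theorem build_sets_spec : Claim_equal_build_sets := by
  intro foods _
  show build_sets foods = build_sets_alt foods
  simp only [build_sets, build_sets_alt]
  rw [foldA_split, A_pairs, B_pairs]
  exact Prod.ext rfl (dict_items_eq _)
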